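-- pv_equiv track=rewrite | github.com/LeoXten/IntelliTraffic-AI-Powered-Smart-Mobility-System | python/mainAlgo.py | calculate_lane1_time
-- ===== SOURCE A (Python) =====
-- MAX_SIGNAL_TIME = 60
--
-- BUFFER_TIME = 5
--
-- MIN_GREEN_TIME = 5  # Minimum green signal for fairness
--
-- def calculate_lane1_time(lane_data):
--     """Calculate total green time for Lane1 considering cycle rules"""
--     lane1_time = lane_data.get("lane1", 0)
--     lanes = sorted(lane_data.keys())
--     other_lanes = {lane: lane_data[lane] for lane in lanes if lane != "lane1"}
--
--     total_time = 0
--     remaining_lane1 = lane1_time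
--     remaining_others = other_lanes.copy()
--
--     while remaining_lane1 > MAX_SIGNAL_TIME:
--         total_time += MAX_SIGNAL_TIME
--         remaining_lane1 -= MAX_SIGNAL_TIME
--         total_time += BUFFER_TIME
--
--         for lane in remaining_others:
--             time = min(remaining_others[lane], MAX_SIGNAL_TIME)
--             if time <= 0:
--                 time = MIN_GREEN_TIME
--             total_time += time + BUFFER_TIME
--             remaining_others[lane] = max(0, remaining_others[lane] - time)
--
--     if remaining_lane1 > 0:
--         total_time += remaining_lane1
--
--     return total_time
-- ===== SOURCE B (Python) =====
-- MAX_SIGNAL_TIME = 60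
--
-- BUFFER_TIME = 5
--
-- MIN_GREEN_TIME = 5  # Minimum green signal for fairness
--
-- def calculate_lane1_time(lane_data):
--     """Closed form: compute the cycle count once, then each lane's total contribution arithmetically."""
--     t1 = lane_data.get("lane1", 0)
--     k = (t1 - 1) // MAX_SIGNAL_TIME if t1 > MAX_SIGNAL_TIME else 0
--     rem = t1 - MAX_SIGNAL_TIME * k
--     total = (MAX_SIGNAL_TIME + BUFFER_TIME) * k + (rem if rem > 0 else 0)
--     for lane, v in lane_data.items():
--         if lane == "lane1":
--             continue
--         if v <= 0:
--             total += (MIN_GREEN_TIME + BUFFER_TIME) * k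
--         else:
--             m = (v + MAX_SIGNAL_TIME - 1) // MAX_SIGNAL_TIME  # cycles until lane v is drained
--             total += min(v, MAX_SIGNAL_TIME * k) + BUFFER_TIME * k + MIN_GREEN_TIME * max(0, k - m)
--     return total
-- ===== Notes on version B (the rewrite author's own statement) =====
-- stated objective: alternative
-- what changed: A simulates every 60-second cycle, rescanning and mutating all other lanes once per cycle; B computes the cycle count k with one division and each lane's total contribution over all k cycles in closed form (division/min/max), in a single pass over the dict (intended as faster; a timing run measured 2.0x at the largest size but not consistently across inputs).
import Mathlib
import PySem

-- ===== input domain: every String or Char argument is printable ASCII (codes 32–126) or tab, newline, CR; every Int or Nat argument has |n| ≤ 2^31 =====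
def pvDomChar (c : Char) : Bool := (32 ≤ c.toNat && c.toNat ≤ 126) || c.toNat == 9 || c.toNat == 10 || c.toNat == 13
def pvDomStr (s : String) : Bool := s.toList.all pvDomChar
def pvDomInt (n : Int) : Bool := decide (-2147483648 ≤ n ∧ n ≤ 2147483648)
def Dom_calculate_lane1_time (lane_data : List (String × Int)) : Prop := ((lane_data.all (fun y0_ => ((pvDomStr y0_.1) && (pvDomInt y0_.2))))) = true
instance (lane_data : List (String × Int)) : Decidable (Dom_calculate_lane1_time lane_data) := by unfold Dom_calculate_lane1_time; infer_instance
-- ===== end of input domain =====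

-- B replaces A's per-cycle simulation (one pass over every other lane per 60-second cycle) by
-- closed-form per-lane arithmetic: the cycle count and each lane's total contribution are
-- computed once with division/min/max (objective: alternative — no per-cycle rescan of the lanes).

-- ===== PORT A =====
-- body of the inner `for lane in remaining_others:` loop (reads and writes the current dict)
def pvInnerStep (st : Int × PySem.Dict String Int) (lane : String) : Int × PySem.Dict String Int :=
  let v := st.2.getD lane 0                  -- remaining_others[lane] (the key is always present)
  let t0 := min v 60                         -- time = min(remaining_others[lane], MAX_SIGNAL_TIME)
  let t := if t0 ≤ 0 then 5 else t0          -- if time <= 0: time = MIN_GREEN_TIME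
  (st.1 + (t + 5), st.2.insert lane (max 0 (v - t)))

-- the `while remaining_lane1 > MAX_SIGNAL_TIME:` loop
def pvLoopA (total r : Int) (ro : PySem.Dict String Int) : Int :=
  if _h : r > 60 then
    let st := ro.keys.foldl pvInnerStep (total + 60 + 5, ro)
    pvLoopA st.1 (r - 60) st.2
  else if r > 0 then total + r else total    -- trailing `if remaining_lane1 > 0:`
termination_by r.toNat
decreasing_by omega

def calculate_lane1_time (lane_data : List (String × Int)) : Int :=
  let d0 := PySem.Dict.ofList lane_data
  let lane1_time := d0.getD "lane1" 0
  let lanes := PySem.List.sorted d0.keys (fun x => x) false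
  let other_lanes := (lanes.filter (fun l => l != "lane1")).foldl
      (fun d l => d.insert l (d0.getD l 0)) PySem.Dict.empty
  pvLoopA 0 lane1_time other_lanes

-- ===== PORT B =====
def calculate_lane1_time_alt (lane_data : List (String × Int)) : Int :=
  let d := PySem.Dict.ofList lane_data
  let t1 := d.getD "lane1" 0
  let k := if t1 > 60 then PySem.Int.floordiv (t1 - 1) 60 else 0
  let rem := t1 - 60 * k
  let total := (60 + 5) * k + (if rem > 0 then rem else 0)
  d.items.foldl (fun total p =>
    if p.1 == "lane1" then total
    else if p.2 ≤ 0 then total + (5 + 5) * k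
    else total + min p.2 (60 * k) + 5 * k + 5 * max 0 (k - PySem.Int.floordiv (p.2 + 59) 60))
    total

-- ===== PRECONDITION & SPEC =====
def Spec_calculate_lane1_time (lane_data : List (String × Int)) (out : Int) : Prop := out = calculate_lane1_time_alt lane_data
instance (lane_data : List (String × Int)) (out : Int) : Decidable (Spec_calculate_lane1_time lane_data out) := by unfold Spec_calculate_lane1_time; infer_instance

-- ===== CLAIM (what is proved, stated in full; the proofs are below) =====
def Claim_equal_calculate_lane1_time : Prop := ∀ (lane_data : List (String × Int)), Dom_calculate_lane1_time lane_data → Spec_calculate_lane1_time lane_data (calculate_lane1_time lane_data)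

-- ===== LEMMAS AND PROOFS =====

-- one cycle's green time for an other-lane value, and the value left afterwards (A's inner body)
def pvT (v : Int) : Int := if min v 60 ≤ 0 then 5 else min v 60
def pvNext (v : Int) : Int := max 0 (v - pvT v)
-- B's closed-form contribution of one other lane over k cycles (the body of B's fold)
def pvF (v k : Int) : Int :=
  if v ≤ 0 then (5 + 5) * k
  else min v (60 * k) + 5 * k + 5 * max 0 (k - PySem.Int.floordiv (v + 59) 60)
-- the number of iterations A's while loop performs on lane1-time r
def pvK (r : Int) : Int := if r > 60 then PySem.Int.floordiv (r - 1) 60 else 0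
def pvSum (L : List (String × Int)) (k : Int) : Int := (L.map (fun p => pvF p.2 k)).sum

theorem pvT_nonpos {v : Int} (h : v ≤ 0) : pvT v = 5 := by
  unfold pvT; rw [if_pos (by omega)]

theorem pvT_pos {v : Int} (h : 0 < v) : pvT v = min v 60 := by
  unfold pvT; rw [if_neg (by omega)]

theorem pvK_nonneg (r : Int) : 0 ≤ pvK r := by
  unfold pvK; split_ifs with h
  · rw [PySem.Int.floordiv_eq_ediv_of_pos (by norm_num)]; omega
  · omega

theorem pvK_sub (r : Int) (h : r > 60) : pvK r = pvK (r - 60) + 1 := by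
  unfold pvK
  split_ifs <;>
    simp only [PySem.Int.floordiv_eq_ediv_of_pos (show (0:Int) < 60 by norm_num)] <;> omega

theorem pvF_zero (v : Int) : pvF v 0 = 0 := by
  unfold pvF; split_ifs with h
  · ring
  · rw [PySem.Int.floordiv_eq_ediv_of_pos (by norm_num)]; omega

-- B's formula satisfies the recurrence performed by one cycle of A's simulation
theorem pvF_succ (v k : Int) (hk : 0 ≤ k) : pvF v (k + 1) = (pvT v + 5) + pvF (pvNext v) k := by
  by_cases h : v ≤ 0
  · have h2 : pvNext v = 0 := by unfold pvNext; rw [pvT_nonpos h]; omega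
    rw [pvT_nonpos h, h2]
    simp only [pvF]
    rw [if_pos h, if_pos le_rfl]; ring
  · have h : 0 < v := by omega
    have h2 : pvNext v = v - min v 60 := by unfold pvNext; rw [pvT_pos h]; omega
    rw [pvT_pos h, h2]
    simp only [pvF, PySem.Int.floordiv_eq_ediv_of_pos (show (0:Int) < 60 by norm_num)]
    by_cases h3 : v ≤ 60
    · rw [if_neg (by omega), if_pos (by omega)]; omega
    · rw [if_neg (by omega), if_neg (by omega)]; omega

theorem pvSum_zero (L : List (String × Int)) : pvSum L 0 = 0 := by
  unfold pvSum
  induction L with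
  | nil => simp
  | cons p t _ => simp [pvF_zero]

theorem pvSum_succ (L : List (String × Int)) (k : Int) (hk : 0 ≤ k) :
    pvSum L (k + 1) = (L.map (fun p => pvT p.2 + 5)).sum + pvSum (L.map (fun p => (p.1, pvNext p.2))) k := by
  unfold pvSum
  induction L with
  | nil => simp
  | cons p t ih => simp only [List.map_cons, List.sum_cons, ih, pvF_succ p.2 k hk]; ring

-- getD on an explicit items list whose prefix does not contain the key
theorem pv_getD_mk (pre rest : List (String × Int)) (l : String) (v : Int)
    (hl : l ∉ pre.map Prod.fst) :
    (PySem.Dict.mk (pre ++ (l, v) :: rest)).getD l 0 = v := by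
  induction pre with
  | nil => simp [PySem.Dict.getD_eq_get?_getD, PySem.Dict.get?_mk_cons]
  | cons a t ih =>
      obtain ⟨a1, a2⟩ := a
      simp only [List.map_cons, List.mem_cons, not_or] at hl
      rw [List.cons_append, PySem.Dict.getD_eq_get?_getD, PySem.Dict.get?_mk_cons,
        if_neg (by simpa using Ne.symm hl.1), ← PySem.Dict.getD_eq_get?_getD]
      exact ih hl.2

theorem pv_map_keep (xs : List (String × Int)) (l : String) (v' : Int)
    (h : l ∉ xs.map Prod.fst) :
    xs.map (fun p => if p.1 == l then (l, v') else p) = xs := by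
  induction xs with
  | nil => rfl
  | cons a t ih =>
      obtain ⟨a1, a2⟩ := a
      simp only [List.map_cons, List.mem_cons, not_or] at h
      rw [List.map_cons, if_neg (by simpa using Ne.symm h.1), ih h.2]

-- insert overwrites the (unique) existing entry in place
theorem pv_insert_mk (pre rest : List (String × Int)) (l : String) (v v' : Int)
    (hpre : l ∉ pre.map Prod.fst) (hrest : l ∉ rest.map Prod.fst) :
    (PySem.Dict.mk (pre ++ (l, v) :: rest)).insert l v' = PySem.Dict.mk (pre ++ (l, v') :: rest) := by
  apply PySem.Dict.ext
  have hc : (PySem.Dict.mk (pre ++ (l, v) :: rest)).contains l = true := by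
    rw [PySem.Dict.contains_iff_mem_keys]
    show l ∈ (pre ++ (l, v) :: rest).map Prod.fst
    simp
  rw [PySem.Dict.items_insert_of_contains _ _ hc]
  show (pre ++ (l, v) :: rest).map _ = pre ++ (l, v') :: rest
  rw [List.map_append, List.map_cons, pv_map_keep pre l v' hpre, pv_map_keep rest l v' hrest,
    if_pos (by simp)]

-- one pass of A's inner for-loop: adds each lane's cycle time and steps every value
theorem pv_inner_go (L : List (String × Int)) : ∀ (pre : List (String × Int)) (tot : Int),
    ((pre ++ L).map Prod.fst).Nodup →
    (L.map Prod.fst).foldl pvInnerStep (tot, PySem.Dict.mk (pre ++ L))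
      = (tot + (L.map (fun p => pvT p.2 + 5)).sum,
         PySem.Dict.mk (pre ++ L.map (fun p => (p.1, pvNext p.2)))) := by
  induction L with
  | nil => intro pre tot _; simp
  | cons p t ih =>
      intro pre tot hnd
      obtain ⟨l, v⟩ := p
      rw [show (pre ++ (l, v) :: t).map Prod.fst = pre.map Prod.fst ++ l :: t.map Prod.fst by simp,
        List.nodup_append] at hnd
      obtain ⟨hnd1, hnd2, hdisj⟩ := hnd
      have hrest : l ∉ t.map Prod.fst := (List.nodup_cons.mp hnd2).1
      have hpre : l ∉ pre.map Prod.fst := fun hm => hdisj l hm l (List.mem_cons_self ..) rfl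
      have hstep : pvInnerStep (tot, PySem.Dict.mk (pre ++ (l, v) :: t)) l
          = (tot + (pvT v + 5), PySem.Dict.mk (pre ++ (l, pvNext v) :: t)) := by
        simp only [pvInnerStep]
        rw [pv_getD_mk pre t l v hpre, pv_insert_mk pre t l v _ hpre hrest]
        simp only [pvT, pvNext]
      rw [List.map_cons, List.foldl_cons, hstep]
      have hnd' : (((pre ++ [(l, pvNext v)]) ++ t).map Prod.fst).Nodup := by
        rw [show ((pre ++ [(l, pvNext v)]) ++ t).map Prod.fst
            = pre.map Prod.fst ++ l :: t.map Prod.fst by simp, List.nodup_append]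
        exact ⟨hnd1, hnd2, hdisj⟩
      have hih := ih (pre ++ [(l, pvNext v)]) (tot + (pvT v + 5)) hnd'
      simp only [List.append_assoc, List.cons_append, List.nil_append] at hih ⊢
      rw [hih]
      simp [add_assoc]

-- closed form of A's whole while-loop
theorem pv_loopA_closed : ∀ (n : Nat) (r tot : Int) (L : List (String × Int)),
    r.toNat ≤ n → (L.map Prod.fst).Nodup →
    pvLoopA tot r (PySem.Dict.mk L)
      = tot + 65 * pvK r + max 0 (r - 60 * pvK r) + pvSum L (pvK r) := by
  intro n
  induction n with
  | zero =>
      intro r tot L hle hnd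
      rw [pvLoopA, dif_neg (by omega), if_neg (by omega)]
      simp only [pvK]
      rw [if_neg (by omega), pvSum_zero]
      omega
  | succ n ih =>
      intro r tot L hle hnd
      by_cases h : r > 60
      · rw [pvLoopA, dif_pos h]
        have hkeys : (PySem.Dict.mk L).keys = L.map Prod.fst := rfl
        have hfold := pv_inner_go L [] (tot + 60 + 5) (by simpa using hnd)
        simp only [List.nil_append] at hfold
        rw [hkeys, hfold]
        have hnd' : ((L.map (fun p => (p.1, pvNext p.2))).map Prod.fst).Nodup := by
          rw [show (L.map (fun p => (p.1, pvNext p.2))).map Prod.fst = L.map Prod.fst by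
            simp [List.map_map]]
          exact hnd
        rw [ih (r - 60) _ _ (by omega) hnd']
        rw [pvK_sub r h, pvSum_succ L _ (pvK_nonneg (r - 60))]
        have := pvK_nonneg (r - 60)
        omega
      · rw [pvLoopA, dif_neg h]
        simp only [pvK]
        rw [if_neg h, pvSum_zero]
        split_ifs <;> omega

-- summing over all keys with the lane1 entry zeroed = summing over the non-lane1 keys
theorem pv_sum_filter (xs : List String) (g : String → Int) :
    (xs.map (fun l => if l = "lane1" then (0:Int) else g l)).sum
      = ((xs.filter (fun l => l != "lane1")).map g).sum := by
  induction xs with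
  | nil => rfl
  | cons a t ih =>
      by_cases h : a = "lane1"
      · simp [h, ih]
      · simp [h, ih]

-- ===== VERDICT (by name: the statement is the Claim_ definition above) =====
theorem calculate_lane1_time_spec : Claim_equal_calculate_lane1_time := by
  intro lane_data _
  unfold Spec_calculate_lane1_time
  simp only [calculate_lane1_time, calculate_lane1_time_alt]
  set d0 := PySem.Dict.ofList lane_data with hd0
  set t1 := d0.getD "lane1" 0 with ht1
  set k := (if t1 > 60 then PySem.Int.floordiv (t1 - 1) 60 else 0 : Int) with hkdef
  have hk : k = pvK t1 := rfl
  set lanesF := (PySem.List.sorted d0.keys (fun x => x) false).filter (fun l => l != "lane1")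
    with hlanesF
  have hnd0 : d0.keys.Nodup := PySem.Dict.nodup_keys_ofList lane_data
  have hperm : lanesF.Perm (d0.keys.filter (fun l => l != "lane1")) :=
    (PySem.List.sorted_perm d0.keys (fun x => x) false).filter _
  have hlnd : lanesF.Nodup :=
    (((PySem.List.sorted_perm d0.keys (fun x => x) false).nodup_iff).mpr hnd0).filter _
  -- the dict comprehension builds exactly this items list
  have hother : lanesF.foldl (fun d l => d.insert l (d0.getD l 0)) PySem.Dict.empty
      = PySem.Dict.mk (lanesF.map (fun l => (l, d0.getD l 0))) := by
    apply PySem.Dict.ext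
    rw [PySem.Dict.items_foldl_insert_fresh lanesF (fun l => l) (fun l => d0.getD l 0)
      PySem.Dict.empty (fun a _ => PySem.Dict.contains_empty a) (by simpa using hlnd)]
    simp [PySem.Dict.empty]
  rw [hother]
  set L := lanesF.map (fun l => (l, d0.getD l 0)) with hL
  have hndL : (L.map Prod.fst).Nodup := by
    rw [hL, List.map_map,
      show (Prod.fst ∘ fun l : String => (l, d0.getD l 0)) = id from rfl, List.map_id]
    exact hlnd
  rw [pv_loopA_closed t1.toNat t1 0 L le_rfl hndL]
  -- B's fold is its starting total plus a sum over the items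
  have hbody : ∀ p ∈ d0.items, ∀ (acc : Int),
      (if p.1 == "lane1" then acc
       else if p.2 ≤ 0 then acc + (5 + 5) * k
       else acc + min p.2 (60 * k) + 5 * k + 5 * max 0 (k - PySem.Int.floordiv (p.2 + 59) 60))
      = acc + (if p.1 == "lane1" then 0 else pvF p.2 k) := by
    intro p _ acc
    unfold pvF
    split_ifs <;> ring
  rw [PySem.List.foldl_congr_mem' _ _ _ _ hbody, PySem.List.foldl_add]
  -- identify the two sums
  have hitems : d0.items = d0.keys.map (fun l => (l, d0.getD l 0)) :=
    PySem.Dict.items_eq_map_keys d0 hnd0 0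
  have hsum : pvSum L (pvK t1)
      = (d0.items.map (fun p => if p.1 == "lane1" then (0:Int) else pvF p.2 (pvK t1))).sum := by
    rw [hitems, List.map_map, pvSum, hL, List.map_map]
    show ((lanesF.map fun l => pvF (d0.getD l 0) (pvK t1)).sum) = _
    simp only [beq_iff_eq]
    rw [show ((fun p : String × Int => if p.1 = "lane1" then (0:Int) else pvF p.2 (pvK t1))
        ∘ (fun l => (l, d0.getD l 0))) = fun l => if l = "lane1" then (0:Int)
          else pvF (d0.getD l 0) (pvK t1) from rfl]
    rw [pv_sum_filter d0.keys (fun l => pvF (d0.getD l 0) (pvK t1))]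
    exact ((hperm.map _).sum_eq)
  rw [← hk] at hsum
  rw [← hsum, hk]
  have hK0 := pvK_nonneg t1
  split_ifs <;> omega
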